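-- pv_equiv track=rewrite | github.com/pypi-data/pypi-mirror-382 | packages/one-step-frames/one_step_frames-1.3.5.tar.gz/one_step_frames-1.3.5/one_step_frames/util/core/formula.py | checkIfFree
-- ===== SOURCE A (Python) =====
-- modalOperators = ["#","@","#'","@'"]
--
-- def checkIfFree(atomicFormula:str)->bool:
--     """Given some atomic formula, it checks if the variable is free.
--     Example:#x -> NOT FREE,x -> FREE.
--     It works by first finding the propositional variable,
--     then checking if it has some modal operator connected to it.
--
--     Args:
--         atomicFormula (str): atomic formula to check
--
--     Returns:
--         bool: True if free, otherwise False
--     """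
--     propIdx = -1
--
--     for i,j in enumerate(atomicFormula):
--         if j.isalpha():
--             propIdx = i
--
--         if (propIdx!=-1):
--             break
--
--     temp = propIdx
--
--     while (temp>=0):
--         if atomicFormula[temp] in modalOperators:
--             return False
--         temp-=1
--
--     return True
-- ===== SOURCE B (Python) =====
-- modalOperators = ["#","@","#'","@'"]
--
-- def checkIfFree(atomicFormula: str) -> bool:
--     seen = False
--     for ch in atomicFormula:
--         if ch.isalpha():
--             return not seen
--         if ch == '#' or ch == '@':
--             seen = True
--     return True
-- ===== Notes on version B (the rewrite author's own statement) =====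
-- stated objective: simpler
-- what changed: Replaces the forward find-the-variable pass plus backward index scan over modalOperators with a single forward pass keeping a boolean flag (has a modal operator appeared before the first letter), returning immediately at the first letter.
import Mathlib
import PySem

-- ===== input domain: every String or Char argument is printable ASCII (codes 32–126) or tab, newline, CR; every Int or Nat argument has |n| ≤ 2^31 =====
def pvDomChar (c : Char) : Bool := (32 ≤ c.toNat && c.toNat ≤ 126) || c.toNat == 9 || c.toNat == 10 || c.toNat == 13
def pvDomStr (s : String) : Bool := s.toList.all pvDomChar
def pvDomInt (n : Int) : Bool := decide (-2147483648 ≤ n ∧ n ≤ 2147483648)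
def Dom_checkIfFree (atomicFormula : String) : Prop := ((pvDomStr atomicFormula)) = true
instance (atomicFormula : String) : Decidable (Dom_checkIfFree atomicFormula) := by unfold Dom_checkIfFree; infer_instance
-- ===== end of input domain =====

-- B replaces A's forward find-the-variable pass plus backward scan by one forward pass with a
-- boolean flag; same return value everywhere (objective: simpler).

-- ===== PORT A =====
def modalOperators : List String := ["#", "@", "#'", "@'"]

-- the for-loop: propIdx starts at -1 and the loop breaks as soon as propIdx != -1
def findPropIdx : List Char → Int → Int
  | [], _ => -1
  | j :: rest, i =>
      if PySem.Chars.isalpha j then i   -- propIdx := i, then break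
      else findPropIdx rest (i + 1)

-- the while-loop over temp (temp ≥ 0), indexing the string; out-of-range (never reached
-- from a valid propIdx) is mapped to false
def whileFree (s : List Char) (temp : Int) : Bool :=
  if _h : 0 ≤ temp then
    match PySem.List.pyGet? s temp with
    | some c => if modalOperators.contains (String.ofList [c]) then false else whileFree s (temp - 1)
    | none => false
  else
    true
termination_by (temp + 1).toNat
decreasing_by omega

def checkIfFree (atomicFormula : String) : Bool :=
  whileFree atomicFormula.toList (findPropIdx atomicFormula.toList 0)

-- ===== PORT B =====
def altLoop (seen : Bool) : List Char → Bool
  | [] => true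
  | ch :: rest =>
      if PySem.Chars.isalpha ch then !seen
      else if ch = '#' ∨ ch = '@' then altLoop true rest
      else altLoop seen rest

def checkIfFree_alt (atomicFormula : String) : Bool :=
  altLoop false atomicFormula.toList

-- ===== PRECONDITION & SPEC =====
def Spec_checkIfFree (atomicFormula : String) (out : Bool) : Prop := out = checkIfFree_alt atomicFormula
instance (atomicFormula : String) (out : Bool) : Decidable (Spec_checkIfFree atomicFormula out) := by unfold Spec_checkIfFree; infer_instance

-- ===== CLAIM (what is proved, stated in full; the proofs are below) =====
def Claim_equal_checkIfFree : Prop := ∀ (atomicFormula : String), Dom_checkIfFree atomicFormula → Spec_checkIfFree atomicFormula (checkIfFree atomicFormula)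

-- ===== LEMMAS AND PROOFS =====

def isModal (c : Char) : Bool := c = '#' ∨ c = '@'


theorem contains_modal (c : Char) : modalOperators.contains (String.ofList [c]) = isModal c := by
  by_cases h1 : c = '#'
  · subst h1; decide
  · by_cases h2 : c = '@'
    · subst h2; decide
    · simp [modalOperators, isModal, h1, h2, List.contains_eq_mem, String.ext_iff, String.toList_ofList]

theorem isModal_not_alpha {c : Char} (h : isModal c = true) : PySem.Chars.isalpha c = false := by
  simp only [isModal, decide_eq_true_eq] at h
  rcases h with h | h <;> subst h <;> decide

-- B's loop, characterised
theorem altLoop_spec (l : List Char) (seen : Bool) :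
    altLoop seen l =
      if l.any PySem.Chars.isalpha then
        !(seen || (l.takeWhile (fun c => !PySem.Chars.isalpha c)).any isModal)
      else true := by
  induction l generalizing seen with
  | nil => simp [altLoop]
  | cons c rest ih =>
    by_cases ha : PySem.Chars.isalpha c
    · simp [altLoop, ha]
    · by_cases hm : (c = '#' ∨ c = '@')
      · have hmm : isModal c = true := by simp [isModal, hm]
        simp [altLoop, ha, hm, ih, hmm]
      · have hmm : isModal c = false := by simp [isModal]; tauto
        simp [altLoop, ha, hm, ih, hmm]

theorem pyGet_nat (l : List Char) (k : Nat) (h : k < l.length) :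
    PySem.List.pyGet? l (k : Int) = some l[k] := by
  rw [PySem.List.pyGet?_natCast]; exact List.getElem?_eq_getElem h

-- one unfolding of A's while-loop at a valid non-negative index
theorem whileFree_step (l : List Char) (k : Nat) (h : k < l.length) :
    whileFree l (k : Int) = if isModal l[k] then false else whileFree l ((k : Int) - 1) := by
  rw [whileFree, dif_pos (Int.natCast_nonneg k)]
  simp only [pyGet_nat l k h]
  rw [contains_modal]

theorem whileFree_neg_one (l : List Char) : whileFree l (-1) = true := by
  rw [whileFree]; norm_num

-- A's while-loop checks exactly the first (n+1) characters
theorem whileFree_spec (l : List Char) (n : Nat) (hn : n < l.length) :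
    whileFree l (n : Int) = !((l.take (n + 1)).any isModal) := by
  induction n with
  | zero =>
    rw [whileFree_step l 0 hn]
    have h0 : ((0 : Nat) : Int) - 1 = -1 := by omega
    by_cases h : isModal l[0]
    · rw [if_pos h, List.take_succ_eq_append_getElem hn]
      simp [h]
    · rw [if_neg h, h0, whileFree_neg_one, List.take_succ_eq_append_getElem hn]
      simp [h]
  | succ k ih =>
    rw [whileFree_step l (k + 1) hn]
    have h1 : ((k + 1 : Nat) : Int) - 1 = ((k : Nat) : Int) := by omega
    have hany : (l.take (k + 1 + 1)).any isModal
        = ((l.take (k + 1)).any isModal || isModal l[k + 1]) := by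
      rw [List.take_succ_eq_append_getElem hn, List.any_append, List.any_cons, List.any_nil,
        Bool.or_false]
    by_cases h : isModal l[k + 1]
    · rw [if_pos h, hany, h, Bool.or_true, Bool.not_true]
    · rw [Bool.not_eq_true] at h
      rw [if_neg (by simp [h]), h1, ih (by omega), hany, h, Bool.or_false]

-- A's for-loop finds the first alphabetic index (or leaves -1)
theorem findPropIdx_spec (l : List Char) (k : Int) :
    findPropIdx l k =
      if l.any PySem.Chars.isalpha then k + (l.findIdx PySem.Chars.isalpha : Int) else -1 := by
  induction l generalizing k with
  | nil => simp [findPropIdx]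
  | cons c rest ih =>
    by_cases ha : PySem.Chars.isalpha c
    · simp [findPropIdx, ha, List.findIdx_cons]
    · rw [Bool.not_eq_true] at ha
      simp only [findPropIdx, ha, Bool.false_eq_true, if_false, ih, List.any_cons,
        List.findIdx_cons, cond_false, Bool.false_or]
      split
      · push_cast; ring
      · rfl

-- the prefix up to and including the first alphabetic character has the same modal content
-- as the prefix strictly before it (the letter itself is not a modal operator)
theorem take_findIdx_any (l : List Char) (h : l.any PySem.Chars.isalpha = true) :
    (l.take (l.findIdx PySem.Chars.isalpha + 1)).any isModal
      = (l.takeWhile (fun c => !PySem.Chars.isalpha c)).any isModal := by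
  induction l with
  | nil => simp at h
  | cons c rest ih =>
    by_cases ha : PySem.Chars.isalpha c
    · have hnm : isModal c = false := by
        by_cases hm : isModal c
        · exact absurd (isModal_not_alpha hm) (by simp [ha])
        · simpa using hm
      simp [List.findIdx_cons, ha, hnm]
    · have hrest : rest.any PySem.Chars.isalpha = true := by
        simpa [ha] using h
      simp [List.findIdx_cons, ha, ih hrest]

-- ===== VERDICT (by name: the statement is the Claim_ definition above) =====
theorem checkIfFree_spec : Claim_equal_checkIfFree := by
  unfold Claim_equal_checkIfFree
  intro s _
  unfold Spec_checkIfFree checkIfFree checkIfFree_alt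
  set l := s.toList with hl
  rw [findPropIdx_spec, altLoop_spec]
  by_cases h : l.any PySem.Chars.isalpha
  · have hlt : l.findIdx PySem.Chars.isalpha < l.length :=
      List.findIdx_lt_length_of_exists (by simpa [List.any_eq_true] using h)
    simp only [h, if_true, Bool.false_or]
    have hc : (0 : Int) + (l.findIdx PySem.Chars.isalpha : Int)
        = ((l.findIdx PySem.Chars.isalpha : Nat) : Int) := by omega
    rw [hc, whileFree_spec l _ hlt, take_findIdx_any l h]
  · simp only [h]
    exact whileFree_neg_one l
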